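-- pv_equiv track=rewrite | github.com/marceloyb/rsakeys | rsa.py | dpick
-- ===== SOURCE A (Python) =====
-- def dpick(e, z):
--     # passo 4 do algoritmo
--     # escolhe d, tal que e*d-1 seja divisível exatamente por z
--     d = 1
--     while(True):
--         d = (e*d)-1
--         if(d % z == 0):
--             return d
--         else:
--             d += 1
-- ===== SOURCE B (Python) =====
-- def dpick(e, z):
--     # Group-theoretic algorithm: the answer is e**k - 1 for k = ord(e) mod |z|,
--     # and ord(e) divides phi(|z|).  So: compute phi(|z|) by trial-division
--     # factorization, enumerate the divisors of phi in increasing order, and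
--     # return pow(e, k) - 1 for the first divisor k with e**k == 1 (mod |z|).
--     n = abs(z)
--     # Euler's phi(n) via trial division
--     phi, m, p = 1, n, 2
--     while p * p <= m:
--         if m % p == 0:
--             phi *= p - 1
--             m //= p
--             while m % p == 0:
--                 phi *= p
--                 m //= p
--         p += 1
--     if m > 1:
--         phi *= m - 1
--     # all divisors of phi, in increasing order
--     divs = []
--     i = 1
--     while i * i <= phi:
--         if phi % i == 0:
--             divs.append(i)
--             if i != phi // i:
--                 divs.append(phi // i)
--         i += 1
--     divs.sort()
--     # the order of e modulo n is the smallest divisor k of phi with e**k == 1 (mod n)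
--     for k in divs:
--         if pow(e, k, n) == 1 % n:
--             return pow(e, k) - 1
-- ===== Notes on version B (the rewrite author's own statement) =====
-- stated objective: alternative
-- what changed: A linearly searches k = 1,2,3,... with growing-bignum multiplications until z divides e^k - 1; B uses group theory instead of linear search: it computes Euler's phi(|z|) by trial-division factorization, enumerates the divisors of phi in increasing order, and returns pow(e,k)-1 for the smallest divisor k with pow(e,k,|z|) == 1, which is the multiplicative order of e.
import Mathlib
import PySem

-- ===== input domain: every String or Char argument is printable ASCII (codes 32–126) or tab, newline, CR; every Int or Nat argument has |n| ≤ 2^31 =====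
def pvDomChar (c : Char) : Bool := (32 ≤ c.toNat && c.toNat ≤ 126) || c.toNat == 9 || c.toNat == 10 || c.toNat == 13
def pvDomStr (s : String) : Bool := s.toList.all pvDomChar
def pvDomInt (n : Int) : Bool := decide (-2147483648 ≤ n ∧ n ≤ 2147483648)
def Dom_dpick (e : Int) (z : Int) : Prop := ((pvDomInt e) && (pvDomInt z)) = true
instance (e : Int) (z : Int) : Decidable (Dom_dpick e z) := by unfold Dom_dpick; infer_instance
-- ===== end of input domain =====

-- B replaces A's linear search over exponents by a group-theoretic algorithm:
-- phi(|z|) via trial-division factorization, then the smallest divisor of phi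
-- that is an exponent of 1 (objective: alternative).


-- ===== PORT A =====
-- A's `while True` loop, with fuel z.natAbs: under Pre_dpick the minimal k with
-- z ∣ e^k - 1 is at most |z|, so the fuel is never exhausted (fuel 0 is unreachable).
def dpickLoop (e : Int) (z : Int) (d : Int) : Nat → Int
  | 0 => 0
  | fuel + 1 =>
    let d' := e * d - 1
    if PySem.Int.mod d' z = 0 then d' else dpickLoop e z (d' + 1) fuel

def dpick (e : Int) (z : Int) : Int := dpickLoop e z 1 z.natAbs

-- ===== PORT B =====
-- inner `while m % p == 0: phi *= p; m //= p` of B's phi loop; fuel ≥ m suffices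
def stripLoop (p : Nat) (phi : Nat) (m : Nat) : Nat → Nat × Nat
  | 0 => (phi, m)
  | f + 1 => if m % p = 0 then stripLoop p (phi * p) (m / p) f else (phi, m)

-- outer `while p * p <= m` trial-division loop computing Euler's phi; the
-- trailing `if m > 1: phi *= m - 1` is the exit expression; fuel ≥ m suffices
def phiLoop (phi : Nat) (m : Nat) (p : Nat) : Nat → Nat
  | 0 => if 1 < m then phi * (m - 1) else phi
  | f + 1 =>
    if p * p ≤ m then
      if m % p = 0 then
        let s := stripLoop p (phi * (p - 1)) (m / p) (m / p)
        phiLoop s.1 s.2 (p + 1) f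
      else phiLoop phi m (p + 1) f
    else if 1 < m then phi * (m - 1) else phi

-- `while i * i <= phi` collecting the divisors i and phi // i; fuel ≥ phi suffices
def divLoop (phi : Nat) (i : Nat) (acc : List Nat) : Nat → List Nat
  | 0 => acc
  | f + 1 =>
    if i * i ≤ phi then
      if phi % i = 0 then
        divLoop phi (i + 1) (acc ++ [i] ++ (if i ≠ phi / i then [phi / i] else [])) f
      else divLoop phi (i + 1) acc f
    else acc

-- `for k in divs: if pow(e, k, n) == 1 % n: return pow(e, k) - 1`
-- (0 on fall-through: Python returns None there, which Pre_dpick excludes)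
def scanDivs (e : Int) (n : Int) : List Nat → Int
  | [] => 0
  | k :: ks =>
    if PySem.Int.powMod e k n = PySem.Int.mod 1 n then e ^ k - 1 else scanDivs e n ks

def dpick_alt (e : Int) (z : Int) : Int :=
  let n := z.natAbs
  let phi := phiLoop 1 n 2 (n + 1)
  let divs := PySem.List.sorted (divLoop phi 1 [] (phi + 1)) (fun x => x) false
  scanDivs e (n : Int) divs

-- ===== PRECONDITION & SPEC =====
-- Pre_ excludes z = 0 (A raises ZeroDivisionError) and gcd(e,z) ≠ 1 (A loops
-- forever: some power of e is ≡ 1 mod z iff e is coprime to z); this is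
-- exactly A's termination domain.
def Pre_dpick (e : Int) (z : Int) : Prop := z ≠ 0 ∧ Int.gcd e z = 1
instance (e : Int) (z : Int) : Decidable (Pre_dpick e z) := by unfold Pre_dpick; infer_instance
def pvWitness_dpick : Int × Int := (2, 7)

def Spec_dpick (e : Int) (z : Int) (out : Int) : Prop := out = dpick_alt e z
instance (e : Int) (z : Int) (out : Int) : Decidable (Spec_dpick e z out) := by unfold Spec_dpick; infer_instance

-- ===== CLAIM (what is proved, stated in full; the proofs are below) =====
def Claim_equal_dpick : Prop := ∀ (e : Int) (z : Int), Dom_dpick e z → Pre_dpick e z → Spec_dpick e z (dpick e z)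

-- ===== LEMMAS AND PROOFS =====

-- Python-mod congruence: fmod only depends on the residue class.
theorem pymod_congr (x y z : Int) (h : z ∣ (x - y)) :
    PySem.Int.mod x z = PySem.Int.mod y z := by
  have h1 : x % z = y % z := by
    rw [Int.emod_eq_emod_iff_emod_sub_eq_zero]
    exact Int.emod_eq_zero_of_dvd h
  have h2 : (z ∣ x) ↔ (z ∣ y) := by
    constructor
    · intro hx; have := dvd_sub hx h; simpa using this
    · intro hy; have := dvd_add hy h; simpa using this
  simp only [PySem.Int.mod, Int.fmod_eq_emod, h1, h2]

-- converse direction: equal Python mods give a multiple of z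
theorem dvd_of_pymod_eq (x y z : Int) (h : PySem.Int.mod x z = PySem.Int.mod y z) :
    z ∣ (x - y) := by
  have hx := PySem.Int.floordiv_mul_add_mod x z
  have hy := PySem.Int.floordiv_mul_add_mod y z
  exact ⟨PySem.Int.floordiv x z - PySem.Int.floordiv y z, by linear_combination hy - hx + h⟩

-- A's loop returns e^K - 1 for the minimal exponent K in reach of the fuel.
theorem dpickLoop_eq (e z : Int) :
    ∀ (fuel j K : Nat), j + 1 ≤ K → K < j + 1 + fuel → z ∣ e ^ K - 1 →
      (∀ m : Nat, j + 1 ≤ m → m < K → ¬ z ∣ e ^ m - 1) →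
      dpickLoop e z (e ^ j) fuel = e ^ K - 1 := by
  intro fuel
  induction fuel with
  | zero => intro j K h1 h2 _ _; omega
  | succ f ih =>
    intro j K h1 h2 hK hmin
    have hpow : e * e ^ j - 1 = e ^ (j + 1) - 1 := by ring
    by_cases hc : z ∣ e ^ (j + 1) - 1
    · have hKj : K = j + 1 := by
        by_contra hne
        exact hmin (j + 1) le_rfl (by omega) hc
    -- the test succeeds immediately
      have hc' : PySem.Int.mod (e * e ^ j - 1) z = 0 := by
        rw [hpow, PySem.Int.mod_eq_zero_iff_dvd]; exact hc
      simp only [dpickLoop, hc', if_pos]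
      rw [hpow, hKj]
    · have hc' : ¬ PySem.Int.mod (e * e ^ j - 1) z = 0 := by
        rw [hpow, PySem.Int.mod_eq_zero_iff_dvd]; exact hc
      simp only [dpickLoop, hc', if_neg, not_false_iff]
      have hstep : e * e ^ j - 1 + 1 = e ^ (j + 1) := by ring
      rw [hstep]
      have hKne : K ≠ j + 1 := fun h => hc (h ▸ hK)
      exact ih (j + 1) K (by omega) (by omega) hK
        (fun m hm hmK => hmin m (by omega) hmK)

-- stripLoop divides out the full power of p (fuel ≥ m is enough).
theorem stripLoop_eq (p : Nat) (hp : 2 ≤ p) :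
    ∀ (fuel m phi : Nat), 1 ≤ m → m ≤ fuel →
      ∃ a r : Nat, m = p ^ a * r ∧ ¬ p ∣ r ∧ 1 ≤ r ∧
        stripLoop p phi m fuel = (phi * p ^ a, r) := by
  intro fuel
  induction fuel with
  | zero => intro m phi h1 h2; omega
  | succ f ih =>
    intro m phi h1 h2
    by_cases hd : m % p = 0
    · have hdvd : p ∣ m := Nat.dvd_of_mod_eq_zero hd
      have hmp1 : 1 ≤ m / p := Nat.one_le_div_iff (by omega) |>.mpr (Nat.le_of_dvd (by omega) hdvd)
      have hlt : m / p < m := Nat.div_lt_self (by omega) (by omega)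
      obtain ⟨a, r, hmr, hnr, hr1, hres⟩ := ih (m / p) (phi * p) hmp1 (by omega)
      refine ⟨a + 1, r, ?_, hnr, hr1, ?_⟩
      · have : m = p * (m / p) := (Nat.mul_div_cancel' hdvd).symm
        rw [this, hmr]; ring
      · simp only [stripLoop, hd, if_pos, hres, pow_succ]; ring_nf
    · refine ⟨0, m, by simp, ?_, h1, by simp [stripLoop, hd]⟩
      intro h
      exact hd (Nat.mod_eq_zero_of_dvd h)

-- phiLoop computes phi times Euler's totient of what remains.
theorem phiLoop_eq :
    ∀ (fuel phi m p : Nat), 1 ≤ m → 2 ≤ p →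
      (∀ q : Nat, q.Prime → q ∣ m → p ≤ q) → m + 2 ≤ fuel + p →
      phiLoop phi m p fuel = phi * Nat.totient m := by
  intro fuel
  induction fuel with
  | zero =>
    intro phi m p h1 _ hfac hfuel
    have hm1 : m = 1 := by
      by_contra hne
      have h2m : 2 ≤ m := by omega
      have hq := Nat.minFac_prime (by omega : m ≠ 1)
      have := hfac m.minFac hq (Nat.minFac_dvd m)
      have := Nat.minFac_le (by omega : 0 < m)
      omega
    simp [phiLoop, hm1]
  | succ f ih =>
    intro phi m p h1 hp hfac hfuel
    by_cases hpp : p * p ≤ m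
    · by_cases hd : m % p = 0
      · -- p is the least prime factor of m; strip it completely
        have hdvd : p ∣ m := Nat.dvd_of_mod_eq_zero hd
        have hpprime : p.Prime := by
          have hq := Nat.minFac_prime (by omega : p ≠ 1)
          have hqm : p.minFac ∣ m := dvd_trans (Nat.minFac_dvd p) hdvd
          have h1' := hfac p.minFac hq hqm
          have h2' := Nat.minFac_le (by omega : 0 < p)
          have : p.minFac = p := by omega
          rw [← this]; exact hq
        have hmp1 : 1 ≤ m / p := Nat.one_le_div_iff (by omega) |>.mpr (Nat.le_of_dvd (by omega) hdvd)
        obtain ⟨a, r, hmr, hnr, hr1, hres⟩ :=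
          stripLoop_eq p hp (m / p) (m / p) (phi * (p - 1)) hmp1 le_rfl
        have hm_eq : m = p ^ (a + 1) * r := by
          have : m = p * (m / p) := (Nat.mul_div_cancel' hdvd).symm
          rw [this, hmr]; ring
        have hrm : r ≤ m / p := by
          calc r ≤ p ^ a * r := Nat.le_mul_of_pos_left r (Nat.pow_pos (by omega))
          _ = m / p := hmr.symm
        have hmplt : m / p < m := Nat.div_lt_self (by omega) (by omega)
        have hrec := ih (phi * (p - 1) * p ^ a) r (p + 1) hr1 (by omega)
          (fun q hq hqr => by
            have hqm : q ∣ m := hm_eq ▸ Dvd.dvd.mul_left hqr _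
            have h1' := hfac q hq hqm
            have : q ≠ p := fun h => hnr (h ▸ hqr)
            omega)
          (by omega)
        have hcop : Nat.Coprime (p ^ (a + 1)) r :=
          Nat.Coprime.pow_left _ ((Nat.Prime.coprime_iff_not_dvd hpprime).mpr hnr)
        have htot : Nat.totient m = p ^ a * (p - 1) * Nat.totient r := by
          rw [hm_eq, Nat.totient_mul hcop, Nat.totient_prime_pow_succ hpprime]
        simp only [phiLoop, hpp, hd, if_pos, hres]
        rw [hrec, htot]; ring
      · simp only [phiLoop, hpp, hd, if_pos, if_neg, not_false_iff]
        exact ih phi m (p + 1) h1 (by omega)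
          (fun q hq hqm => by
            have h1' := hfac q hq hqm
            have : q ≠ p := fun h => hd (Nat.mod_eq_zero_of_dvd (h ▸ hqm))
            omega)
          (by omega)
    · -- exit: m = 1 or m is prime
      have hout : phiLoop phi m p (f + 1) = if 1 < m then phi * (m - 1) else phi := by
        simp [phiLoop, hpp]
      rw [hout]
      by_cases hm1 : 1 < m
      · have hmprime : m.Prime := by
          by_contra hnp
          have hsq := Nat.minFac_sq_le_self (by omega : 0 < m) hnp
          have hq := Nat.minFac_prime (by omega : m ≠ 1)
          have h1' := hfac m.minFac hq (Nat.minFac_dvd m)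
          have : p * p ≤ m.minFac * m.minFac := Nat.mul_le_mul h1' h1'
          have : m.minFac ^ 2 = m.minFac * m.minFac := sq m.minFac
          omega
        rw [Nat.totient_prime hmprime]
        simp [hm1]
      · have : m = 1 := by omega
        simp [this]

-- membership in the collected divisor list
theorem divLoop_mem (phi : Nat) :
    ∀ (fuel i : Nat) (acc : List Nat), 1 ≤ i → phi + 1 ≤ fuel + i →
      ∀ d, d ∈ divLoop phi i acc fuel ↔
        (d ∈ acc ∨ ∃ j, i ≤ j ∧ j * j ≤ phi ∧ phi % j = 0 ∧ (d = j ∨ d = phi / j)) := by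
  intro fuel
  induction fuel with
  | zero =>
    intro i acc h1 hf d
    simp only [divLoop]
    constructor
    · exact Or.inl
    · rintro (h | ⟨j, hij, hjj, _, _⟩)
      · exact h
      · have : j ≤ j * j := Nat.le_mul_of_pos_left j (by omega)
        omega
  | succ f ih =>
    intro i acc h1 hf d
    by_cases hii : i * i ≤ phi
    · by_cases hd : phi % i = 0
      · have hrec := ih (i + 1) (acc ++ [i] ++ (if i ≠ phi / i then [phi / i] else [])) (by omega) (by omega) d
        simp only [divLoop, hii, hd, if_pos]
        rw [hrec]
        have hmem' : d ∈ acc ++ [i] ++ (if i ≠ phi / i then [phi / i] else []) ↔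
            d ∈ acc ∨ d = i ∨ d = phi / i := by
          by_cases heq : i = phi / i
          · rw [if_neg (fun hne => hne heq), ← heq]
            simp only [List.append_nil, List.mem_append, List.mem_singleton]
            tauto
          · rw [if_pos heq]
            simp only [List.mem_append, List.mem_singleton]
            tauto
        rw [hmem']
        constructor
        · rintro ((h | h | h) | ⟨j, hj1, hj2, hj3, hj4⟩)
          · exact Or.inl h
          · exact Or.inr ⟨i, le_rfl, hii, hd, Or.inl h⟩
          · exact Or.inr ⟨i, le_rfl, hii, hd, Or.inr h⟩
          · exact Or.inr ⟨j, by omega, hj2, hj3, hj4⟩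
        · rintro (h | ⟨j, hj1, hj2, hj3, hj4⟩)
          · exact Or.inl (Or.inl h)
          · by_cases hji : j = i
            · subst hji
              rcases hj4 with h | h
              · exact Or.inl (Or.inr (Or.inl h))
              · exact Or.inl (Or.inr (Or.inr h))
            · exact Or.inr ⟨j, by omega, hj2, hj3, hj4⟩
      · simp only [divLoop, hii, hd, if_pos, if_neg, not_false_iff]
        rw [ih (i + 1) _ (by omega) (by omega) d]
        constructor
        · rintro (h | ⟨j, hj1, hj2, hj3, hj4⟩)
          · exact Or.inl h
          · exact Or.inr ⟨j, by omega, hj2, hj3, hj4⟩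
        · rintro (h | ⟨j, hj1, hj2, hj3, hj4⟩)
          · exact Or.inl h
          · have : i ≠ j := fun h' => hd (h' ▸ hj3)
            exact Or.inr ⟨j, by omega, hj2, hj3, hj4⟩
    · simp only [divLoop, hii, if_neg, not_false_iff]
      constructor
      · exact Or.inl
      · rintro (h | ⟨j, hj1, hj2, _, _⟩)
        · exact h
        · have : i * i ≤ j * j := Nat.mul_le_mul hj1 hj1
          omega

-- the first divisor in an ascending list that satisfies the order test is the order
theorem scanDivs_eq (e nI : Int) (o : Nat)
    (hPo : PySem.Int.powMod e o nI = PySem.Int.mod 1 nI) :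
    ∀ l : List Nat, l.Pairwise (· ≤ ·) → o ∈ l →
      (∀ k, k ∈ l → PySem.Int.powMod e k nI = PySem.Int.mod 1 nI → o ≤ k) →
      scanDivs e nI l = e ^ o - 1 := by
  intro l
  induction l with
  | nil => intro _ h; simp at h
  | cons k ks ih =>
    intro hpair hmem hmin
    rcases List.pairwise_cons.mp hpair with ⟨hle, hpair'⟩
    by_cases hP : PySem.Int.powMod e k nI = PySem.Int.mod 1 nI
    · have hko : k = o := by
        have h1 := hmin k (List.mem_cons_self) hP
        rcases List.mem_cons.mp hmem with h | h
        · omega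
        · have := hle o h; omega
      simp only [scanDivs]
      rw [if_pos hP, hko]
    · have ho : o ∈ ks := by
        rcases List.mem_cons.mp hmem with h | h
        · exact absurd (h ▸ hPo) hP
        · exact h
      simp only [scanDivs, hP, if_neg, not_false_iff]
      exact ih hpair' ho (fun j hj => hmin j (List.mem_cons_of_mem _ hj))

-- ===== VERDICT (by name: the statement is the Claim_ definition above) =====
theorem dpick_spec : Claim_equal_dpick := by
  unfold Claim_equal_dpick
  intro e z _ hpre
  obtain ⟨hz, hgcd⟩ := hpre
  unfold Spec_dpick dpick dpick_alt
  have hn1 : 1 ≤ z.natAbs := by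
    have : z.natAbs ≠ 0 := by simpa using hz
    omega
  set n := z.natAbs with hn_def
  haveI : NeZero n := ⟨by omega⟩
  -- the unit e of (ZMod n)ˣ and its multiplicative order o
  have hu' : IsUnit ((e : ZMod n)) := by
    rw [ZMod.coe_int_isUnit_iff_isCoprime, Int.isCoprime_iff_gcd_eq_one]
    simpa [Int.gcd, Nat.gcd_comm, Int.natAbs_abs] using hgcd
  obtain ⟨u, hu⟩ := hu'
  set o := orderOf u with ho_def
  have ho1 : 1 ≤ o := orderOf_pos u
  have hophi : o ∣ Nat.totient n := by
    have := orderOf_dvd_card (x := u)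
    rwa [ZMod.card_units_eq_totient] at this
  have hphi1 : 1 ≤ Nat.totient n := Nat.totient_pos.mpr (by omega)
  have hophile : o ≤ Nat.totient n := Nat.le_of_dvd (by omega) hophi
  have hphin : Nat.totient n ≤ n := Nat.totient_le n
  -- z ∣ e^k - 1 ↔ o ∣ k
  have hdvd_iff : ∀ k : Nat, z ∣ e ^ k - 1 ↔ o ∣ k := by
    intro k
    constructor
    · intro h
      have h' : ((n : Int)) ∣ e ^ k - 1 := by rw [hn_def, Int.natAbs_dvd]; exact h
      have h2 : ((e ^ k - 1 : ℤ) : ZMod n) = 0 := (ZMod.intCast_zmod_eq_zero_iff_dvd _ _).mpr h'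
      push_cast at h2
      rw [sub_eq_zero] at h2
      have h4 : u ^ k = 1 := Units.ext (by rw [Units.val_pow_eq_pow_val, hu, h2, Units.val_one])
      exact orderOf_dvd_of_pow_eq_one h4
    · intro h
      have h4 : u ^ k = 1 := orderOf_dvd_iff_pow_eq_one.mp h
      have h3 : (e : ZMod n) ^ k = 1 := by rw [← hu, ← Units.val_pow_eq_pow_val, h4, Units.val_one]
      have h2 : ((e ^ k - 1 : ℤ) : ZMod n) = 0 := by push_cast; rw [h3]; ring
      have h' := (ZMod.intCast_zmod_eq_zero_iff_dvd _ _).mp h2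
      rw [hn_def, Int.natAbs_dvd] at h'
      exact h'
  -- A's linear search finds exactly the order o
  have hA : dpickLoop e z 1 n = e ^ o - 1 := by
    have := dpickLoop_eq e z n 0 o ho1 (by omega) ((hdvd_iff o).mpr dvd_rfl)
      (fun m hm hmo hdv => absurd (Nat.le_of_dvd (by omega) ((hdvd_iff m).mp hdv)) (by omega))
    simpa using this
  -- B's phi loop computes Euler's totient
  have hphi : phiLoop 1 n 2 (n + 1) = Nat.totient n := by
    have := phiLoop_eq (n + 1) 1 n 2 hn1 le_rfl (fun q hq _ => hq.two_le) (by omega)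
    simpa using this
  have hmemD : ∀ d, d ∈ divLoop (Nat.totient n) 1 [] (Nat.totient n + 1) ↔
      ∃ j, 1 ≤ j ∧ j * j ≤ Nat.totient n ∧ Nat.totient n % j = 0 ∧
        (d = j ∨ d = Nat.totient n / j) := by
    intro d
    rw [divLoop_mem (Nat.totient n) (Nat.totient n + 1) 1 [] le_rfl (by omega) d]
    simp
  -- o appears in the collected divisor list
  have hoD : o ∈ divLoop (Nat.totient n) 1 [] (Nat.totient n + 1) := by
    rw [hmemD]
    rcases Nat.lt_or_ge (o * o) (Nat.totient n + 1) with hlt | hge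
    · exact ⟨o, ho1, by omega, Nat.mod_eq_zero_of_dvd hophi, Or.inl rfl⟩
    · have hco : (Nat.totient n / o) * o = Nat.totient n := Nat.div_mul_cancel hophi
      have hc1 : 1 ≤ Nat.totient n / o := (Nat.one_le_div_iff (by omega)).mpr hophile
      have hcc : (Nat.totient n / o) * (Nat.totient n / o) ≤ Nat.totient n := by
        by_contra hcc
        push Not at hcc
        have h1 : (Nat.totient n + 1) * (Nat.totient n + 1) ≤
            ((Nat.totient n / o) * (Nat.totient n / o)) * (o * o) :=
          Nat.mul_le_mul (by omega) (by omega)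
        have h2 : ((Nat.totient n / o) * (Nat.totient n / o)) * (o * o) =
            Nat.totient n * Nat.totient n := by
          rw [show ((Nat.totient n / o) * (Nat.totient n / o)) * (o * o) =
            ((Nat.totient n / o) * o) * ((Nat.totient n / o) * o) from by ring, hco]
        nlinarith
      refine ⟨Nat.totient n / o, hc1, hcc, Nat.mod_eq_zero_of_dvd ⟨o, hco.symm⟩, Or.inr ?_⟩
      exact (Nat.div_div_self hophi (by omega)).symm
  -- the order test of B's scan is exactly "z divides e^k - 1"
  have hP_iff : ∀ k : Nat,
      (PySem.Int.powMod e k (n : Int) = PySem.Int.mod 1 (n : Int)) ↔ z ∣ e ^ k - 1 := by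
    intro k
    rw [PySem.Int.powMod_eq]
    constructor
    · intro h
      have := dvd_of_pymod_eq (e ^ k) 1 (n : Int) h
      rw [hn_def, Int.natAbs_dvd] at this
      exact this
    · intro h
      refine pymod_congr (e ^ k) 1 (n : Int) ?_
      rw [hn_def, Int.natAbs_dvd]
      exact h
  -- B's scan over the sorted divisors returns e^o - 1 as well
  have hB : scanDivs e (n : Int)
      (PySem.List.sorted (divLoop (Nat.totient n) 1 [] (Nat.totient n + 1)) (fun x => x) false)
      = e ^ o - 1 := by
    refine scanDivs_eq e (n : Int) o ((hP_iff o).mpr ((hdvd_iff o).mpr dvd_rfl)) _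
      ?_ ?_ ?_
    · exact PySem.List.sorted_pairwise _ _
    · exact (PySem.List.mem_sorted _ _ _ _).mpr hoD
    · intro k hk hPk
      have hkD : k ∈ divLoop (Nat.totient n) 1 [] (Nat.totient n + 1) :=
        (PySem.List.mem_sorted _ _ _ _).mp hk
      have hk1 : 1 ≤ k := by
        rcases (hmemD k).mp hkD with ⟨j, hj1, hjj, hjd, hkj | hkj⟩
        · omega
        · have hjle : j ≤ Nat.totient n := by
            have : j ≤ j * j := Nat.le_mul_of_pos_left j (by omega)
            omega
          have : 1 ≤ Nat.totient n / j := (Nat.one_le_div_iff (by omega)).mpr hjle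
          omega
      have hok : o ∣ k := (hdvd_iff k).mp ((hP_iff k).mp hPk)
      exact Nat.le_of_dvd (by omega) hok
  show dpickLoop e z 1 n = scanDivs e ((n : Nat) : Int)
    (PySem.List.sorted (divLoop (phiLoop 1 n 2 (n + 1)) 1 [] (phiLoop 1 n 2 (n + 1) + 1))
      (fun x => x) false)
  rw [hphi, hA, hB]
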